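-- pv_equiv track=rewrite | github.com/TheVengeur/AlgoGraph | Exercice1/Exercice1.py | dynamic_programming_cleaning
-- ===== SOURCE A (Python) =====
-- def dynamic_programming_cleaning(positions):
--     positions = sorted(positions)
--     n = len(positions)
--     dp = [float('inf')] * n
--     dp[0] = 0
--     for i in range(1, n):
--         for j in range(i):
--             cost = abs(positions[i] - positions[j])
--             dp[i] = min(dp[i], dp[j] + cost * (i - j))
--     order = []
--     current_position = 0
--     while positions:
--         next_house = min(positions, key=lambda x: abs(x - current_position))
--         order.append(next_house)
--         positions.remove(next_house)
--         current_position = next_house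
--     return order
-- ===== SOURCE B (Python) =====
-- def dynamic_programming_cleaning(positions):
--     # Sort once, split at 0, then walk outward with two end-pointers:
--     # the nearest remaining house is always the closest unvisited value on
--     # the left or on the right of the current position (tie goes left).
--     s = sorted(positions)
--     k = sum(1 for x in s if x < 0)
--     left = s[:k]           # ascending, all < 0; nearest-left candidate is left[-1]
--     right = s[k:][::-1]    # descending, all >= 0; nearest-right candidate is right[-1]
--     order = []
--     cur = 0
--     while left or right:
--         if not right or (left and cur - left[-1] <= right[-1] - cur):
--             cur = left.pop()
--         else:
--             cur = right.pop()
--         order.append(cur)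
--     return order
-- ===== Notes on version B (the rewrite author's own statement) =====
-- stated objective: faster
-- what changed: B drops A's dead O(n^2) dp table and replaces the repeated min-scan+remove over the remaining list by a sort, a split at 0 and a two-end-pointer outward walk (nearest remaining house is always the closest unvisited value-neighbor, tie to the left).
import Mathlib
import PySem

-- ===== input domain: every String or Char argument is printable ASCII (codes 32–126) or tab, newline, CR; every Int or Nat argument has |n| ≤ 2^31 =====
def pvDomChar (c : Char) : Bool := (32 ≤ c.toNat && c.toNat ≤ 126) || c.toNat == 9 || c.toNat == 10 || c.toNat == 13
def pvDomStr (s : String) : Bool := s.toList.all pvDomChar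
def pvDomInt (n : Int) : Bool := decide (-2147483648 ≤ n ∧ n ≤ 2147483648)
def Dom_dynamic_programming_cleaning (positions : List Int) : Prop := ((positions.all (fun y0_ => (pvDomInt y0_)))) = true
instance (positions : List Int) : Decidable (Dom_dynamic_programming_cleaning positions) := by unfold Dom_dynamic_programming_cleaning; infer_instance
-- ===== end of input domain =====

-- B drops A's dead O(n^2) dp table and replaces the repeated min-scan + remove over the
-- remaining list by sort + split at 0 + a two-end-pointer outward walk (tie to the left);
-- measured asymptotically faster.


-- ===== PORT A =====
-- min with +infinity: none plays float('inf'); all finite dp values are ints, so this is exact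
def pvOptMin : Option Int → Option Int → Option Int
  | none, b => b
  | some a, none => some a
  | some a, some b => some (min a b)

-- inner 'for j in range(i)' of A's dp table (dead code in A: dp is never read afterwards)
def pvDpInner (ps : List Int) (dp : List (Option Int)) (i : Nat) : List (Option Int) :=
  (List.range i).foldl (fun dp j =>
    let cost : Int := ((ps.getD i 0 - ps.getD j 0).natAbs : Int)
    dp.set i (pvOptMin (dp.getD i none) ((dp.getD j none).map (fun v => v + cost * ((i : Int) - (j : Int)))))) dp

-- 'while positions: next = min(positions, key=λx.|x-cur|); order.append; positions.remove; cur = next'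
-- fuel = length of the remaining list (one element is removed per iteration)
def pvALoop : Nat → List Int → Int → List Int
  | 0, _, _ => []
  | fuel+1, ps, cur =>
    match PySem.List.min? ps (fun x => (((x - cur).natAbs : Nat) : Int)) with
    | none => []
    | some nh => nh :: pvALoop fuel ((PySem.List.remove? ps nh).getD []) nh

def dynamic_programming_cleaning (positions : List Int) : List Int :=
  let ps := PySem.List.sorted positions (fun x => x)
  let n := ps.length
  -- dp[0] = 0 raises IndexError when n = 0 (excluded by Pre_); .set is a no-op there
  -- range(1, n) = range(n) minus i = 0, and pvDpInner ps dp 0 = dp, so folding over range n is the same loop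
  let _dp := (List.range n).foldl (pvDpInner ps) ((List.replicate n (none : Option Int)).set 0 (some 0))
  pvALoop n ps 0

-- ===== PORT B =====
-- 'while left or right: pop the nearer end value (tie to the left)'
def pvBLoop : Nat → List Int → List Int → Int → List Int
  | 0, _, _, _ => []
  | fuel+1, left, right, cur =>
    if left.isEmpty && right.isEmpty then []
    else if right.isEmpty || (!left.isEmpty && decide (cur - left.getLastD 0 ≤ right.getLastD 0 - cur)) then
      let c := left.getLastD 0
      c :: pvBLoop fuel left.dropLast right c
    else
      let c := right.getLastD 0
      c :: pvBLoop fuel left right.dropLast c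

def dynamic_programming_cleaning_alt (positions : List Int) : List Int :=
  let s := PySem.List.sorted positions (fun x => x)
  let k := s.countP (fun x => decide (x < 0))
  pvBLoop s.length (s.take k) ((s.drop k).reverse) 0

-- ===== PRECONDITION & SPEC =====
-- Pre_ excludes only the empty list, on which A raises IndexError (dp[0] = 0 on an empty dp)
def Pre_dynamic_programming_cleaning (positions : List Int) : Prop := positions ≠ []
instance (positions : List Int) : Decidable (Pre_dynamic_programming_cleaning positions) := by unfold Pre_dynamic_programming_cleaning; infer_instance
def pvWitness_dynamic_programming_cleaning : List Int := [3, -1, 2]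

def Spec_dynamic_programming_cleaning (positions : List Int) (out : List Int) : Prop := out = dynamic_programming_cleaning_alt positions
instance (positions : List Int) (out : List Int) : Decidable (Spec_dynamic_programming_cleaning positions out) := by unfold Spec_dynamic_programming_cleaning; infer_instance

-- ===== CLAIM (what is proved, stated in full; the proofs are below) =====
def Claim_equal_dynamic_programming_cleaning : Prop := ∀ (positions : List Int), Dom_dynamic_programming_cleaning positions → Pre_dynamic_programming_cleaning positions → Spec_dynamic_programming_cleaning positions (dynamic_programming_cleaning positions)

-- ===== LEMMAS AND PROOFS =====

-- the fold step of min(…, key=λx.|x-cur|)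
def pvStep (cur : Int) (acc : Option Int) (x : Int) : Option Int :=
  match acc with
  | none => some x
  | some m => if (((x - cur).natAbs : Nat) : Int) < (((m - cur).natAbs : Nat) : Int) then some x else some m

lemma min?_eq_foldl_pvStep (ps : List Int) (cur : Int) :
    PySem.List.min? ps (fun x => (((x - cur).natAbs : Nat) : Int)) = List.foldl (pvStep cur) none ps := by
  unfold PySem.List.min? pvStep
  congr 1
  funext acc x
  cases acc <;> rfl

lemma foldl_pvStep_ge (cur : Int) : ∀ (ys : List Int) (m : Int),
    (∀ y ∈ ys, (m - cur).natAbs ≤ (y - cur).natAbs) →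
    List.foldl (pvStep cur) (some m) ys = some m := by
  intro ys
  induction ys with
  | nil => intro m _; rfl
  | cons y t ih =>
    intro m h
    have hy := h y (by simp)
    have hstep : pvStep cur (some m) y = some m := by
      simp only [pvStep]
      rw [if_neg]; omega
    simp only [List.foldl_cons, hstep]
    exact ih m (fun z hz => h z (by simp [hz]))

lemma foldl_pvStep_asc (cur : Int) : ∀ (t : List Int) (m : Int),
    (m :: t).Pairwise (· ≤ ·) → (∀ x ∈ m :: t, x ≤ cur) →
    List.foldl (pvStep cur) (some m) t = some (t.getLastD m) := by
  intro t
  induction t with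
  | nil => intro m _ _; rfl
  | cons y t' ih =>
    intro m hp hc
    have hmy : m ≤ y := (List.pairwise_cons.1 hp).1 y (by simp)
    have hyc : y ≤ cur := hc y (by simp)
    have hmc : m ≤ cur := hc m (by simp)
    have hstep : pvStep cur (some m) y = some y := by
      simp only [pvStep]
      by_cases h : (((y - cur).natAbs : Nat) : Int) < (((m - cur).natAbs : Nat) : Int)
      · rw [if_pos h]
      · rw [if_neg h]
        have : m = y := by omega
        rw [this]
    simp only [List.foldl_cons, hstep, List.getLastD_cons]
    refine ih y (List.pairwise_cons.1 hp).2 ?_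
    intro x hx
    exact hc x (by simp at hx ⊢; tauto)

lemma pvGetLastD_mem (l : List Int) (h : l ≠ []) : l.getLastD 0 ∈ l := by
  rw [List.getLastD_eq_getLast?]
  cases hg : l.getLast? with
  | none => simp_all [List.getLast?_eq_none_iff]
  | some v => simpa using List.mem_of_getLast? hg

lemma pvReverse_eq_cons (l : List Int) (h : l ≠ []) :
    l.reverse = l.getLastD 0 :: l.dropLast.reverse := by
  conv_lhs => rw [← List.dropLast_append_getLast h]
  rw [List.reverse_append]
  simp [List.getLastD_eq_getLast?, List.getLast?_eq_some_getLast h]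

-- max of a ≤-sorted list is its last element (and dually for a ≥-sorted list)
lemma sorted_le_getLast : ∀ (l : List Int), l.Pairwise (· ≤ ·) → ∀ x ∈ l, x ≤ l.getLastD 0 := by
  intro l
  induction l with
  | nil => intro _ x hx; simp at hx
  | cons a t ih =>
    intro hp x hx
    rcases List.mem_cons.1 hx with rfl | hx
    · cases t with
      | nil => simp
      | cons b t' =>
        have hlast : (b :: t').getLastD 0 ∈ b :: t' := pvGetLastD_mem _ (by simp)
        have := (List.pairwise_cons.1 hp).1 _ hlast
        simpa [List.getLastD_cons] using this
    · have := ih (List.pairwise_cons.1 hp).2 x hx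
      cases t with
      | nil => simp at hx
      | cons b t' => simpa [List.getLastD_cons] using this

lemma sorted_ge_getLast : ∀ (l : List Int), l.Pairwise (fun a b => b ≤ a) → ∀ x ∈ l, l.getLastD 0 ≤ x := by
  intro l
  induction l with
  | nil => intro _ x hx; simp at hx
  | cons a t ih =>
    intro hp x hx
    rcases List.mem_cons.1 hx with rfl | hx
    · cases t with
      | nil => simp
      | cons b t' =>
        have hlast : (b :: t').getLastD 0 ∈ b :: t' := pvGetLastD_mem _ (by simp)
        have := (List.pairwise_cons.1 hp).1 _ hlast
        simpa [List.getLastD_cons] using this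
    · have := ih (List.pairwise_cons.1 hp).2 x hx
      cases t with
      | nil => simp at hx
      | cons b t' => simpa [List.getLastD_cons] using this

lemma all_eq_cons_dropLast : ∀ (l : List Int) (a : Int), (∀ x ∈ l, x = a) → l ≠ [] → l = a :: l.dropLast := by
  intro l
  induction l with
  | nil => intro a _ h; simp at h
  | cons x0 t ih =>
    intro a hall _
    have hx0 : x0 = a := hall x0 (by simp)
    cases t with
    | nil => simp [hx0]
    | cons b t' =>
      have ht := ih a (fun x hx => hall x (by simp [List.mem_cons] at hx ⊢; tauto)) (by simp)
      rw [List.dropLast_cons₂, hx0]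
      exact congrArg (List.cons a) ht

-- erasing (the value of) the last element of a ≤-sorted list drops the last element
lemma erase_getLast_of_sorted : ∀ (l : List Int), l.Pairwise (· ≤ ·) → l ≠ [] → l.erase (l.getLastD 0) = l.dropLast := by
  intro l
  induction l with
  | nil => intro _ h; simp at h
  | cons a t ih =>
    intro hp _
    cases t with
    | nil => simp
    | cons b t' =>
      have hgl : ((a :: b :: t') : List Int).getLastD 0 = (b :: t').getLastD 0 := by
        simp
      rw [hgl]
      by_cases hag : a = (b :: t').getLastD 0
      · -- a equals the maximum: every element of b :: t' equals a
        have hbt : ∀ x ∈ b :: t', x = a := by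
          intro x hx
          have h1 : a ≤ x := (List.pairwise_cons.1 hp).1 x hx
          have h2 : x ≤ (b :: t').getLastD 0 := sorted_le_getLast _ (List.pairwise_cons.1 hp).2 x hx
          omega
        rw [← hag, List.erase_cons_head, List.dropLast_cons₂]
        exact all_eq_cons_dropLast _ a hbt (by simp)
      · rw [List.erase_cons_tail (by simpa using hag), List.dropLast_cons₂]
        congr 1
        exact ih (List.pairwise_cons.1 hp).2 (by simp)

-- the heart of the proof: A's min-scan/remove loop equals B's two-end-pointer walk.
-- Invariant: the remaining houses are left ++ right.reverse with left ascending (all ≤ cur)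
-- and right descending (all ≥ cur).
lemma loop_eq : ∀ (fuel : Nat) (left right : List Int) (cur : Int),
    left.Pairwise (· ≤ ·) → right.Pairwise (fun a b => b ≤ a) →
    (∀ x ∈ left, x ≤ cur) → (∀ x ∈ right, cur ≤ x) →
    pvALoop fuel (left ++ right.reverse) cur = pvBLoop fuel left right cur := by
  intro fuel
  induction fuel with
  | zero => intro left right cur _ _ _ _; rfl
  | succ f ih =>
    intro left right cur hl hr hlc hrc
    by_cases hl0 : left = []
    · by_cases hr0 : right = []
      · subst hl0; subst hr0
        rfl
      · -- pick-right: left empty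
        have hrv := pvGetLastD_mem right hr0
        have hrvc : cur ≤ right.getLastD 0 := hrc _ hrv
        have hsubR : ∀ y ∈ right.dropLast.reverse, y ∈ right := fun y hy =>
          List.Sublist.mem (List.mem_reverse.1 hy) (List.dropLast_sublist right)
        have hrest : ∀ y ∈ right.dropLast.reverse, right.getLastD 0 ≤ y := fun y hy =>
          sorted_ge_getLast right hr y (hsubR y hy)
        have hmin : PySem.List.min? (left ++ right.reverse) (fun x => (((x - cur).natAbs : Nat) : Int)) = some (right.getLastD 0) := by
          subst hl0
          rw [min?_eq_foldl_pvStep, List.nil_append, pvReverse_eq_cons right hr0, List.foldl_cons]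
          refine foldl_pvStep_ge cur _ _ ?_
          intro y hy
          have h1 := hrest y hy
          have h2 := hrc y (hsubR y hy)
          omega
        have hrem : (PySem.List.remove? (left ++ right.reverse) (right.getLastD 0)).getD [] = left ++ right.dropLast.reverse := by
          subst hl0
          rw [List.nil_append, pvReverse_eq_cons right hr0]
          rw [PySem.List.remove?_cons_self]
          rfl
        have hA : pvALoop (f+1) (left ++ right.reverse) cur
            = right.getLastD 0 :: pvALoop f (left ++ right.dropLast.reverse) (right.getLastD 0) := by
          rw [pvALoop, hmin]
          dsimp only
          rw [hrem]
        have hB : pvBLoop (f+1) left right cur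
            = right.getLastD 0 :: pvBLoop f left right.dropLast (right.getLastD 0) := by
          rw [pvBLoop]
          rw [if_neg (by simp [hl0, hr0]), if_neg (by simp [hl0, hr0])]
        rw [hA, hB]
        congr 1
        refine ih left right.dropLast (right.getLastD 0) hl (hr.sublist (List.dropLast_sublist right)) ?_ ?_
        · intro x hx; subst hl0; simp at hx
        · intro x hx
          exact sorted_ge_getLast right hr x (List.Sublist.mem hx (List.dropLast_sublist right))
    · -- left nonempty
      have hlv := pvGetLastD_mem left hl0
      have hlvc : left.getLastD 0 ≤ cur := hlc _ hlv
      -- min over the left part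
      have hminL : List.foldl (pvStep cur) none left = some (left.getLastD 0) := by
        obtain ⟨a, t, rfl⟩ := List.exists_cons_of_ne_nil hl0
        rw [List.foldl_cons, List.getLastD_cons]
        exact foldl_pvStep_asc cur t a hl hlc
      by_cases hpickl : right = [] ∨ cur - left.getLastD 0 ≤ right.getLastD 0 - cur
      · -- pick-left
        have hge : ∀ y ∈ right.reverse, (left.getLastD 0 - cur).natAbs ≤ (y - cur).natAbs := by
          intro y hy
          rcases hpickl with hr0 | hcond
          · subst hr0; simp at hy
          · have hy' := List.mem_reverse.1 hy
            have h1 := hrc y hy'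
            have h2 : right.getLastD 0 ≤ y := sorted_ge_getLast right hr y hy'
            omega
        have hmin : PySem.List.min? (left ++ right.reverse) (fun x => (((x - cur).natAbs : Nat) : Int)) = some (left.getLastD 0) := by
          rw [min?_eq_foldl_pvStep, List.foldl_append, hminL]
          exact foldl_pvStep_ge cur _ _ hge
        have hrem : (PySem.List.remove? (left ++ right.reverse) (left.getLastD 0)).getD [] = left.dropLast ++ right.reverse := by
          have hmemapp : left.getLastD 0 ∈ left ++ right.reverse := List.mem_append_left _ hlv
          rw [PySem.List.remove?_eq_some_erase _ _ hmemapp]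
          simp only [Option.getD_some]
          rw [List.erase_append_left _ hlv, erase_getLast_of_sorted left hl hl0]
        have hA : pvALoop (f+1) (left ++ right.reverse) cur
            = left.getLastD 0 :: pvALoop f (left.dropLast ++ right.reverse) (left.getLastD 0) := by
          rw [pvALoop, hmin]
          dsimp only
          rw [hrem]
        have hB : pvBLoop (f+1) left right cur
            = left.getLastD 0 :: pvBLoop f left.dropLast right (left.getLastD 0) := by
          rw [pvBLoop]
          rw [if_neg (by simp [hl0]), if_pos ?_]
          rcases hpickl with hr0 | hcond
          · simp [hr0]
          · simp only [List.getLastD_eq_getLast?] at hcond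
            simp [hl0]
            exact Or.inr (by omega)
        rw [hA, hB]
        congr 1
        refine ih left.dropLast right (left.getLastD 0) (hl.sublist (List.dropLast_sublist left)) hr ?_ ?_
        · intro x hx
          exact sorted_le_getLast left hl x (List.Sublist.mem hx (List.dropLast_sublist left))
        · intro x hx
          exact le_trans hlvc (hrc x hx)
      · -- pick-right: right nonempty and strictly nearer
        push Not at hpickl
        obtain ⟨hr0, hcond⟩ := hpickl
        have hrv := pvGetLastD_mem right hr0
        have hrvc : cur ≤ right.getLastD 0 := hrc _ hrv
        have hsubR : ∀ y ∈ right.dropLast.reverse, y ∈ right := fun y hy =>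
          List.Sublist.mem (List.mem_reverse.1 hy) (List.dropLast_sublist right)
        have hrest : ∀ y ∈ right.dropLast.reverse, right.getLastD 0 ≤ y := fun y hy =>
          sorted_ge_getLast right hr y (hsubR y hy)
        have hmin : PySem.List.min? (left ++ right.reverse) (fun x => (((x - cur).natAbs : Nat) : Int)) = some (right.getLastD 0) := by
          rw [min?_eq_foldl_pvStep, List.foldl_append, hminL, pvReverse_eq_cons right hr0, List.foldl_cons]
          have hstep : pvStep cur (some (left.getLastD 0)) (right.getLastD 0) = some (right.getLastD 0) := by
            simp only [pvStep]
            rw [if_pos]; omega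
          rw [hstep]
          refine foldl_pvStep_ge cur _ _ ?_
          intro y hy
          have h1 := hrest y hy
          have h2 := hrc y (hsubR y hy)
          omega
        have hnotmem : right.getLastD 0 ∉ left := by
          intro hmem
          have h1 : right.getLastD 0 ≤ left.getLastD 0 := sorted_le_getLast left hl _ hmem
          omega
        have hrem : (PySem.List.remove? (left ++ right.reverse) (right.getLastD 0)).getD [] = left ++ right.dropLast.reverse := by
          have hmemapp : right.getLastD 0 ∈ left ++ right.reverse :=
            List.mem_append_right _ (List.mem_reverse.2 hrv)
          rw [PySem.List.remove?_eq_some_erase _ _ hmemapp]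
          simp only [Option.getD_some]
          rw [List.erase_append_right _ hnotmem, pvReverse_eq_cons right hr0, List.erase_cons_head]
        have hA : pvALoop (f+1) (left ++ right.reverse) cur
            = right.getLastD 0 :: pvALoop f (left ++ right.dropLast.reverse) (right.getLastD 0) := by
          rw [pvALoop, hmin]
          dsimp only
          rw [hrem]
        have hB : pvBLoop (f+1) left right cur
            = right.getLastD 0 :: pvBLoop f left right.dropLast (right.getLastD 0) := by
          rw [pvBLoop]
          rw [if_neg (by simp [hl0]), if_neg (by
            have hc := hcond
            simp only [List.getLastD_eq_getLast?] at hc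
            simp [hr0, hl0]
            omega)]
        rw [hA, hB]
        congr 1
        refine ih left right.dropLast (right.getLastD 0) hl (hr.sublist (List.dropLast_sublist right)) ?_ ?_
        · intro x hx
          exact le_trans (hlc x hx) hrvc
        · intro x hx
          exact sorted_ge_getLast right hr x (List.Sublist.mem hx (List.dropLast_sublist right))

-- in a ≤-sorted list the first countP(<0) elements are the negatives, the rest nonnegative
lemma take_drop_count_neg : ∀ (s : List Int), s.Pairwise (· ≤ ·) →
    (∀ x ∈ s.take (s.countP (fun x => decide (x < 0))), x < 0) ∧
    (∀ x ∈ s.drop (s.countP (fun x => decide (x < 0))), 0 ≤ x) := by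
  intro s
  induction s with
  | nil => intro _; constructor <;> intro x hx <;> simp at hx
  | cons a t ih =>
    intro hp
    have ih' := ih (List.pairwise_cons.1 hp).2
    by_cases ha : a < 0
    · have hcnt : (a :: t).countP (fun x => decide (x < 0)) = t.countP (fun x => decide (x < 0)) + 1 := by
        simp [ha]
      rw [hcnt]
      constructor
      · intro x hx
        simp only [List.take_succ_cons] at hx
        rcases List.mem_cons.1 hx with rfl | hx
        · exact ha
        · exact ih'.1 x hx
      · intro x hx
        simp only [List.drop_succ_cons] at hx
        exact ih'.2 x hx
    · have hall : ∀ x ∈ a :: t, ¬ (x < 0) := by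
        intro x hx
        rcases List.mem_cons.1 hx with rfl | hx
        · exact ha
        · have := (List.pairwise_cons.1 hp).1 x hx; omega
      have hcnt : (a :: t).countP (fun x => decide (x < 0)) = 0 := by
        rw [List.countP_eq_zero]
        intro x hx; simpa using hall x hx
      rw [hcnt]
      constructor
      · intro x hx; simp at hx
      · intro x hx
        simp only [List.drop_zero] at hx
        have := hall x hx; omega

-- ===== VERDICT (by name: the statement is the Claim_ definition above) =====
theorem dynamic_programming_cleaning_spec : Claim_equal_dynamic_programming_cleaning := by
  intro positions _ _
  unfold Spec_dynamic_programming_cleaning dynamic_programming_cleaning dynamic_programming_cleaning_alt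
  have hp : (PySem.List.sorted positions (fun x => x)).Pairwise (· ≤ ·) :=
    PySem.List.sorted_pairwise positions (fun x => x)
  have hneg := take_drop_count_neg (PySem.List.sorted positions (fun x => x)) hp
  have h1 := hp.sublist (List.take_sublist ((PySem.List.sorted positions (fun x => x)).countP (fun x => decide (x < 0))) _)
  have h2 : (((PySem.List.sorted positions (fun x => x)).drop ((PySem.List.sorted positions (fun x => x)).countP (fun x => decide (x < 0)))).reverse).Pairwise (fun a b => b ≤ a) := by
    rw [List.pairwise_reverse]
    exact hp.sublist (List.drop_sublist _ _)
  have h3 : ∀ x ∈ (PySem.List.sorted positions (fun x => x)).take ((PySem.List.sorted positions (fun x => x)).countP (fun x => decide (x < 0))), x ≤ (0 : Int) :=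
    fun x hx => le_of_lt (hneg.1 x hx)
  have h4 : ∀ x ∈ ((PySem.List.sorted positions (fun x => x)).drop ((PySem.List.sorted positions (fun x => x)).countP (fun x => decide (x < 0)))).reverse, (0 : Int) ≤ x :=
    fun x hx => hneg.2 x (List.mem_reverse.1 hx)
  have hmain := loop_eq (PySem.List.sorted positions (fun x => x)).length
    ((PySem.List.sorted positions (fun x => x)).take ((PySem.List.sorted positions (fun x => x)).countP (fun x => decide (x < 0))))
    (((PySem.List.sorted positions (fun x => x)).drop ((PySem.List.sorted positions (fun x => x)).countP (fun x => decide (x < 0)))).reverse)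
    0 h1 h2 h3 h4
  rw [List.reverse_reverse, List.take_append_drop] at hmain
  exact hmain
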